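-- pv_equiv track=rewrite | github.com/CalebBell/thermo | thermo/identifiers.py | checkCAS
-- ===== SOURCE A (Python) =====
-- def checkCAS(CASRN):
--     '''Checks if a CAS number is valid. Returns False if the parser cannot
--     parse the given string..
--
--     Parameters
--     ----------
--     CASRN : string
--         A three-piece, dash-separated set of numbers
--
--     Returns
--     -------
--     result : bool
--         Boolean value if CASRN was valid. If parsing fails, return False also.
--
--     Notes
--     -----
--     Check method is according to Chemical Abstract Society. However, no lookup
--     to their service is performed; therefore, this function cannot detect
--     false positives.
--
--     Function also does not support additional separators, apart from '-'.
--
--     CAS numbers up to the series 1 XXX XXX-XX-X are now being issued.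
--
--     A long can hold CAS numbers up to 2 147 483-64-7
--
--     Examples
--     --------
--     >>> checkCAS('7732-18-5')
--     True
--     >>> checkCAS('77332-18-5')
--     False
--     '''
--     try:
--         check = CASRN[-1]
--         CASRN = CASRN[::-1][1:]
--         productsum = 0
--         i = 1
--         for num in CASRN:
--             if num == '-':
--                 pass
--             else:
--                 productsum += i*int(num)
--                 i += 1
--         return (productsum % 10 == int(check))
--     except:
--         return False
-- ===== SOURCE B (Python) =====
-- def checkCAS(CASRN):
--     # Staged validation + prefix-sum accumulation: validate the check digit and the
--     # dash-stripped body up front with isdigit (no exceptions, no int() parsing),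
--     # then use the identity sum(d_j*(n-j)) = sum of all prefix digit-sums to get the
--     # weighted checksum with a double accumulator - no reversal, no weights, no
--     # multiplication. Digit values come from ord arithmetic.
--     if not CASRN or not CASRN[-1].isdigit():
--         return False
--     body = CASRN[:-1].replace('-', '')
--     if not all(c.isdigit() for c in body):
--         return False
--     total = running = 0
--     for c in body:
--         running += ord(c) - 48
--         total += running
--     return total % 10 == ord(CASRN[-1]) - 48
-- ===== Notes on version B (the rewrite author's own statement) =====
-- stated objective: alternative
-- what changed: B replaces A's try/except reversed scan with a dash-skipping weight counter by staged isdigit validation plus a prefix-sum double accumulator: it validates the check digit and the dash-stripped body up front, then uses the identity sum(d_j*(n-j)) = sum of all prefix digit-sums, so there is no reversal, no weight counter, no multiplication and no exception handling.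
import Mathlib
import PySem

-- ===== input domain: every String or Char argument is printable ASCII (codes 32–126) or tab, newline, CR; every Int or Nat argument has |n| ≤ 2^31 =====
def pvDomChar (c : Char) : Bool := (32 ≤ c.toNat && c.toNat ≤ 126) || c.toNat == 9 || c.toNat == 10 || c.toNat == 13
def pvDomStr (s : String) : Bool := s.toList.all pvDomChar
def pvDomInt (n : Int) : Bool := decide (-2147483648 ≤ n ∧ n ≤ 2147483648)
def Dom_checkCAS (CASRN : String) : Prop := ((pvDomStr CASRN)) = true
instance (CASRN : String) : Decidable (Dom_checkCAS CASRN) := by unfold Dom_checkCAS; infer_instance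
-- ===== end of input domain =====

-- B replaces A's try/except reversed scan with a dash-skip weight counter by staged
-- isdigit validation plus a prefix-sum double accumulator (no reversal, no weights,
-- no exceptions); objective: alternative decomposition, same cost.

-- ===== PORT A =====
-- A's loop: for num in the reversed-and-tailed string, skipping '-', productsum += i*int(num), i += 1;
-- `none` = the int() call raised (propagated to the except branch).
def checkCAS_loop : List Char → Int → Int → Option (Int × Int)
  | [], ps, i => some (ps, i)
  | c :: rest, ps, i =>
    if c = '-' then checkCAS_loop rest ps i
    else
      match PySem.Int.ofChars? [c] with
      | none => none
      | some d => checkCAS_loop rest (ps + i * d) (i + 1)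

def checkCAS (CASRN : String) : Bool :=
  match PySem.List.pyGet? CASRN.toList (-1) with     -- check = CASRN[-1]  (IndexError → except)
  | none => false
  | some check =>
    -- CASRN = CASRN[::-1][1:]
    match checkCAS_loop (PySem.List.slice CASRN.toList.reverse (some 1) none) 0 1 with
    | none => false
    | some (ps, _) =>
      match PySem.Int.ofChars? [check] with          -- int(check)  (ValueError → except)
      | none => false
      | some chk => decide (PySem.Int.mod ps 10 = chk)

-- ===== PORT B =====
-- Source B's loop 'running += ord(c) - 48; total += running' as a fold over (total, running).
def checkCAS_alt_step (tr : Int × Int) (c : Char) : Int × Int :=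
  (tr.1 + (tr.2 + ((c.toNat : Int) - 48)), tr.2 + ((c.toNat : Int) - 48))

def checkCAS_alt (CASRN : String) : Bool :=
  match CASRN.toList.getLast? with                   -- 'not CASRN' guard + CASRN[-1]
  | none => false
  | some ch =>
    if !(PySem.Chars.isdigit ch) then false          -- not CASRN[-1].isdigit()
    else
      -- body = CASRN[:-1].replace('-', ''): a filter, exact since the removed pattern
      -- is a single character and the replacement is empty.
      let body := (PySem.List.slice CASRN.toList none (some (-1))).filter (· ≠ '-')
      if !(body.all PySem.Chars.isdigit) then false  -- not all(c.isdigit() for c in body)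
      else
        decide (PySem.Int.mod (body.foldl checkCAS_alt_step (0, 0)).1 10
          = (ch.toNat : Int) - 48)                   -- total % 10 == ord(CASRN[-1]) - 48

-- ===== PRECONDITION & SPEC =====
def Spec_checkCAS (CASRN : String) (out : Bool) : Prop := out = checkCAS_alt CASRN
instance (CASRN : String) (out : Bool) : Decidable (Spec_checkCAS CASRN out) := by unfold Spec_checkCAS; infer_instance

-- ===== CLAIM (what is proved, stated in full; the proofs are below) =====
def Claim_equal_checkCAS : Prop := ∀ (CASRN : String), Dom_checkCAS CASRN → Spec_checkCAS CASRN (checkCAS CASRN)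

-- ===== LEMMAS AND PROOFS =====

-- digits of a char list as A's per-char int() sees them, failing where int() fails
def pvDigs : List Char → Option (List Int)
  | [] => some []
  | c :: r =>
    match PySem.Int.ofChars? [c], pvDigs r with
    | some d, some ds => some (d :: ds)
    | _, _ => none

-- weighted sum as A computes it: counter starts at i and goes up
def pvWA : List Int → Int → Int
  | [], _ => 0
  | d :: r, i => i * d + pvWA r (i + 1)

-- weighted sum with weight starting at w and going down
def pvWB : List Int → Int → Int
  | [], _ => 0
  | d :: r, w => d * w + pvWB r (w - 1)

-- int() of a single Dom character: the digit value for digits, ValueError otherwise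
theorem pvOfChars_single_ofNat : ∀ n : Nat, n < 127 →
    PySem.Int.ofChars? [Char.ofNat n] =
      if PySem.Chars.isdigit (Char.ofNat n) then some ((n : Int) - 48) else none := by
  decide

theorem pvOfChars_single (c : Char) (h : pvDomChar c = true) :
    PySem.Int.ofChars? [c] =
      if PySem.Chars.isdigit c then some (((c.toNat : Int)) - 48) else none := by
  have hlt : c.toNat < 127 := by
    simp [pvDomChar] at h
    omega
  have := pvOfChars_single_ofNat c.toNat hlt
  rwa [Char.ofNat_toNat] at this

-- on a Dom list, pvDigs succeeds exactly on all-digit lists, returning ord-48 values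
theorem pvDigs_eq (l : List Char) (h : ∀ c ∈ l, pvDomChar c = true) :
    pvDigs l = if l.all PySem.Chars.isdigit
      then some (l.map (fun c => ((c.toNat : Int)) - 48)) else none := by
  induction l with
  | nil => simp [pvDigs]
  | cons c r ih =>
    simp only [pvDigs, ih (fun x hx => h x (by simp [hx])),
      pvOfChars_single c (h c (by simp)), List.all_cons, List.map_cons]
    by_cases hc : PySem.Chars.isdigit c = true <;>
      by_cases hr : r.all PySem.Chars.isdigit = true <;> simp [hc, hr]

theorem pvDigs_append (a b : List Char) :
    pvDigs (a ++ b) = match pvDigs a, pvDigs b with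
      | some da, some db => some (da ++ db) | _, _ => none := by
  induction a with
  | nil => simp [pvDigs]; cases pvDigs b <;> rfl
  | cons c r ih =>
    simp only [List.cons_append, pvDigs, ih]
    cases PySem.Int.ofChars? [c] <;> cases pvDigs r <;> cases pvDigs b <;> rfl

theorem pvDigs_length (l : List Char) (ds : List Int) (h : pvDigs l = some ds) :
    ds.length = l.length := by
  induction l generalizing ds with
  | nil => simp [pvDigs] at h; simp [← h]
  | cons c r ih =>
    simp only [pvDigs] at h
    cases hc : PySem.Int.ofChars? [c] <;> rw [hc] at h
    · exact absurd h (by simp)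
    · cases hr : pvDigs r <;> rw [hr] at h
      · exact absurd h (by simp)
      · cases h; simp [ih _ hr]

-- A's loop skips dashes: running it on a list equals running it on the dash-free part
theorem checkCAS_loop_filter (l : List Char) (ps i : Int) :
    checkCAS_loop l ps i = checkCAS_loop (l.filter (· ≠ '-')) ps i := by
  induction l generalizing ps i with
  | nil => rfl
  | cons c r ih =>
    by_cases hc : c = '-'
    · simp [checkCAS_loop, hc, ih]
    · simp only [checkCAS_loop, if_neg hc, List.filter_cons, decide_eq_true_eq]
      rw [if_pos hc]
      simp only [checkCAS_loop, if_neg hc]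
      cases PySem.Int.ofChars? [c] <;> simp [ih]

-- A's loop, on a dash-free list, is the counter-weighted sum of its digits
theorem checkCAS_loop_eq (l : List Char) (hnd : ∀ c ∈ l, c ≠ '-') (ps i : Int) :
    checkCAS_loop l ps i =
      (pvDigs l).map (fun ds => (ps + pvWA ds i, i + ds.length)) := by
  induction l generalizing ps i with
  | nil => simp [checkCAS_loop, pvDigs, pvWA]
  | cons c r ih =>
    have hc : c ≠ '-' := hnd c (by simp)
    simp only [checkCAS_loop, if_neg hc, pvDigs]
    cases h1 : PySem.Int.ofChars? [c] with
    | none => rfl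
    | some d =>
      show checkCAS_loop r (ps + i * d) (i + 1) = _
      rw [ih (fun x hx => hnd x (by simp [hx]))]
      cases h2 : pvDigs r with
      | none => rfl
      | some ds =>
        simp only [Option.map_some, pvWA, List.length_cons]
        simp only [Option.some.injEq, Prod.mk.injEq]
        constructor <;> (push_cast; ring)

theorem pvWA_append (a b : List Int) (i : Int) :
    pvWA (a ++ b) i = pvWA a i + pvWA b (i + a.length) := by
  induction a generalizing i with
  | nil => simp [pvWA]
  | cons d r ih =>
    simp only [List.cons_append, pvWA, ih, List.length_cons]
    push_cast
    ring_nf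

-- the two weightings agree: scanning the reverse with counter from 1
-- equals scanning forward with weight from the length
theorem pvWA_reverse (ds : List Int) :
    pvWA ds.reverse 1 = pvWB ds ds.length := by
  induction ds with
  | nil => simp [pvWA, pvWB]
  | cons d r ih =>
    simp only [List.reverse_cons, pvWA_append, ih, pvWB, pvWA, List.length_cons,
      List.length_reverse]
    push_cast
    ring_nf

theorem pvDigs_reverse (l : List Char) :
    pvDigs l.reverse = (pvDigs l).map List.reverse := by
  induction l with
  | nil => simp [pvDigs]
  | cons c r ih =>
    simp only [List.reverse_cons, pvDigs_append, ih, pvDigs]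
    cases PySem.Int.ofChars? [c] <;> cases pvDigs r <;> simp

-- B's double accumulator computes the sum of all prefix sums, which is the
-- descending-weight sum pvWB of the digit values
theorem pvFold_eq (ds : List Int) (t r : Int) :
    (ds.foldl (fun (tr : Int × Int) d => (tr.1 + (tr.2 + d), tr.2 + d)) (t, r)).1
      = t + r * ds.length + pvWB ds ds.length := by
  induction ds generalizing t r with
  | nil => simp [pvWB]
  | cons d rest ih =>
    simp only [List.foldl_cons, ih, pvWB, List.length_cons]
    push_cast
    ring_nf

-- ===== VERDICT (by name: the statement is the Claim_ definition above) =====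
theorem checkCAS_spec : Claim_equal_checkCAS := by
  intro CASRN hDom
  unfold Spec_checkCAS checkCAS checkCAS_alt
  have hDom' : CASRN.toList.all pvDomChar = true := hDom
  revert hDom'
  generalize CASRN.toList = cs
  intro hDom'
  cases cs using List.reverseRecOn with
  | nil => simp [PySem.List.pyGet?]
  | append_singleton xs ch =>
    have hch : pvDomChar ch = true := by
      have := List.all_eq_true.mp hDom' ch (by simp)
      simpa using this
    have hxs : ∀ c ∈ xs, pvDomChar c = true := fun c hc => by
      have := List.all_eq_true.mp hDom' c (by simp [hc])
      simpa using this
    rw [PySem.List.pyGet?_neg_one_append_singleton]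
    simp only [PySem.List.slice_from_one, PySem.List.slice_to_neg_one,
      List.reverse_append, List.reverse_cons, List.reverse_nil, List.nil_append,
      List.singleton_append, List.tail_cons, List.dropLast_concat,
      List.getLast?_concat]
    set body := xs.filter (· ≠ '-') with hbody
    have hbodyDom : ∀ c ∈ body, pvDomChar c = true := fun c hc =>
      hxs c (List.mem_of_mem_filter hc)
    have hA : checkCAS_loop xs.reverse 0 1 =
        (pvDigs body).map (fun ds => (pvWB ds body.length, (1 : Int) + ds.length)) := by
      rw [checkCAS_loop_filter, List.filter_reverse, ← hbody,
        checkCAS_loop_eq _ (fun c hc => by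
          have := List.of_mem_filter (List.mem_reverse.mp hc)
          simpa using this),
        pvDigs_reverse]
      cases hd : pvDigs body with
      | none => rfl
      | some ds =>
        simp only [Option.map_some]
        rw [← pvDigs_length _ _ hd, pvWA_reverse]
        simp
    rw [hA, pvDigs_eq body hbodyDom, pvOfChars_single ch hch]
    by_cases hd : PySem.Chars.isdigit ch = true <;>
      by_cases hb : body.all PySem.Chars.isdigit = true
    · -- both valid: the two checksum computations agree
      simp only [hd, hb, if_pos, Bool.not_true, Bool.false_eq_true, if_false,
        Option.map_some]
      have : (body.foldl checkCAS_alt_step (0, 0)).1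
          = pvWB (body.map (fun c => ((c.toNat : Int)) - 48)) body.length := by
        have h1 : body.foldl checkCAS_alt_step (0, 0)
            = (body.map (fun c => ((c.toNat : Int)) - 48)).foldl
                (fun (tr : Int × Int) d => (tr.1 + (tr.2 + d), tr.2 + d)) (0, 0) := by
          rw [List.foldl_map]; rfl
        rw [h1, pvFold_eq]
        simp
      rw [this]
    all_goals simp [hd, hb]
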